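-- pv_equiv track=rewrite | github.com/ubparviz/Python-Dictionary | task22.py | group_students
-- ===== SOURCE A (Python) =====
-- def group_students(students: list[dict[str, str]]) -> dict[str, list[str]]:
--     grouped = {}
--     for student in students:
--         name = student["name"]
--         group = student["group"]
--
--         if group not in grouped:
--             grouped[group] = []
--
--         grouped[group].append(name)
--
--     return grouped
-- ===== SOURCE B (Python) =====
-- def group_students(students: list[dict[str, str]]) -> dict[str, list[str]]:
--     pairs = [(s["group"], s["name"]) for s in students]
--     keys = dict.fromkeys(g for g, _ in pairs)
--     return {g: [n for gg, n in pairs if gg == g] for g in keys}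
-- ===== Notes on version B (the rewrite author's own statement) =====
-- stated objective: alternative
-- what changed: Replaces the single-pass dict-of-appends loop by a declarative two-pass scheme: extract (group,name) pairs, dedup the groups in first-encounter order with dict.fromkeys, then build each group's name list by a per-group comprehension over the pairs.
import Mathlib
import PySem

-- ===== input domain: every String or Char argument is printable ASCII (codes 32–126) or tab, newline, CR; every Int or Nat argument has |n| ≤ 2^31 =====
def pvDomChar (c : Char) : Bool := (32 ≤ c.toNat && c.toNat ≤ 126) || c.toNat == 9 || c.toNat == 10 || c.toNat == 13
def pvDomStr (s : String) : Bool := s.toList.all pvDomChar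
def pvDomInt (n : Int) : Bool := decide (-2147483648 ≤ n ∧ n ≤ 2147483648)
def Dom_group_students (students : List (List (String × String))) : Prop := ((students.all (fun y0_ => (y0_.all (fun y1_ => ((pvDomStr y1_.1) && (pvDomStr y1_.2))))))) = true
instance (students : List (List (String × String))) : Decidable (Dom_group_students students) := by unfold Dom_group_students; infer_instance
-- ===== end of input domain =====

-- B replaces the single-pass dict-of-appends loop by a declarative two-pass scheme (dedup the groups, then one comprehension per group); alternative formulation, not faster.

-- ===== PORT A =====
-- A: one pass, a dict of lists, appending each name to its group's list (empty list inserted on first sight).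
def group_students (students : List (List (String × String))) : List (String × List String) :=
  (students.foldl (fun grouped student =>
      let name := ((PySem.Dict.mk student).get? "name").getD ""      -- student["name"]; KeyError excluded by Pre_
      let group := ((PySem.Dict.mk student).get? "group").getD ""    -- student["group"]; KeyError excluded by Pre_
      let grouped := if grouped.contains group = false then grouped.insert group [] else grouped
      grouped.modify group [] (fun l => l ++ [name]))                -- grouped[group].append(name)
    PySem.Dict.empty).items

-- ===== PORT B =====
-- B: extract (group, name) pairs, dedup the groups in first-encounter order (dict.fromkeys), one filter per group.
def group_students_alt (students : List (List (String × String))) : List (String × List String) :=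
  let pairs := students.map (fun s =>
      (((PySem.Dict.mk s).get? "group").getD "", ((PySem.Dict.mk s).get? "name").getD ""))
  let keys := PySem.List.dedup (pairs.map Prod.fst)
  keys.map (fun g => (g, (pairs.filter (fun p => p.1 == g)).map Prod.snd))

-- ===== PRECONDITION & SPEC =====
-- Pre_ excludes exactly the inputs containing a student without a "name" or a "group" key, on which A raises KeyError (B raises the same KeyError there).
def Pre_group_students (students : List (List (String × String))) : Prop :=
  ∀ s ∈ students, ((PySem.Dict.mk s).get? "name").isSome = true ∧ ((PySem.Dict.mk s).get? "group").isSome = true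
instance (students : List (List (String × String))) : Decidable (Pre_group_students students) := by unfold Pre_group_students; infer_instance
def pvWitness_group_students : (List (List (String × String))) :=
  [[("name", "Ann"), ("group", "A")], [("name", "Bob"), ("group", "B")], [("name", "Cat"), ("group", "A")]]
def Spec_group_students (students : List (List (String × String))) (out : List (String × List String)) : Prop := out = group_students_alt students
instance (students : List (List (String × String))) (out : List (String × List String)) : Decidable (Spec_group_students students out) := by unfold Spec_group_students; infer_instance

-- ===== CLAIM (what is proved, stated in full; the proofs are below) =====
def Claim_equal_group_students : Prop := ∀ (students : List (List (String × String))), Dom_group_students students → Pre_group_students students → Spec_group_students students (group_students students)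

-- ===== LEMMAS AND PROOFS =====

-- A's "insert [] if absent, then append" step is a single Dict.modify.
theorem step_eq_modify (d : PySem.Dict String (List String)) (g n : String) :
    (if d.contains g = false then d.insert g [] else d).modify g [] (fun l => l ++ [n])
      = d.modify g [] (fun l => l ++ [n]) := by
  by_cases h : d.contains g = false
  · rw [if_pos h]
    obtain ⟨items⟩ := d
    simp only [PySem.Dict.contains] at h
    have hall := List.any_eq_false.mp h
    have hf : List.find? (fun p : String × List String => p.1 == g) items = none :=
      List.find?_eq_none.mpr (fun p hp => hall p hp)
    simp only [PySem.Dict.insert, PySem.Dict.modify, PySem.Dict.contains, PySem.Dict.getD,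
      PySem.Dict.get?, h, Bool.false_eq_true, if_false, List.any_append, List.any_cons,
      List.any_nil, beq_self_eq_true, List.map_append, List.map_cons, List.map_nil,
      Bool.or_false, Bool.or_true, if_true, List.find?_append, List.find?_cons, hf]
    simp [List.map_congr_left (fun p hp => if_neg (by simpa using hall p hp))]
  · rw [if_neg h]

-- The equivalence itself (it holds on all inputs; Pre_ only marks where the Pythons return).
theorem group_students_eq_alt (students : List (List (String × String))) :
    group_students students = group_students_alt students := by
  unfold group_students group_students_alt
  have hstep : (students.foldl (fun grouped student =>
      let name := ((PySem.Dict.mk student).get? "name").getD ""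
      let group := ((PySem.Dict.mk student).get? "group").getD ""
      let grouped := if grouped.contains group = false then grouped.insert group [] else grouped
      grouped.modify group [] (fun l => l ++ [name]))
    PySem.Dict.empty)
    = ((students.map (fun s =>
      (((PySem.Dict.mk s).get? "group").getD "", ((PySem.Dict.mk s).get? "name").getD ""))).foldl
        (fun d p => d.modify p.1 [] (fun l => l ++ [p.2])) PySem.Dict.empty) := by
    rw [List.foldl_map]
    apply PySem.List.foldl_congr_mem
    intro d s _
    exact step_eq_modify d _ _
  rw [hstep]
  set pairs := students.map (fun s =>
      (((PySem.Dict.mk s).get? "group").getD "", ((PySem.Dict.mk s).get? "name").getD "")) with hp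
  have hnd : (pairs.foldl (fun d p => d.modify p.1 [] (fun l => l ++ [p.2])) PySem.Dict.empty).keys.Nodup := by
    apply PySem.Dict.nodup_keys_foldl_modify_key
    exact PySem.Dict.nodup_keys_empty
  rw [PySem.Dict.items_eq_map_keys _ hnd []]
  rw [PySem.Dict.keys_foldl_modify_key]
  simp only [PySem.Dict.keys_empty, PySem.Set.update_nil_left, ← PySem.List.dedup_eq_ofList]
  apply List.map_congr_left
  intro g _
  rw [PySem.Dict.getD_foldl_modify_append]
  simp [PySem.Dict.getD_empty]

-- ===== VERDICT (by name: the statement is the Claim_ definition above) =====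
theorem group_students_spec : Claim_equal_group_students := by
  intro students _hdom _hpre
  unfold Spec_group_students
  exact group_students_eq_alt students
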